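-- pv_equiv track=rewrite | github.com/exousiak/PIAI-Algorithm-Study | mh/week02/체육복.py | solution
-- ===== SOURCE A (Python) =====
-- def solution(n, lost, reserve):
--     lost.sort()
--     reserve.sort()
--
--     for l in lost[:]:
--         for r in reserve[:]:
--             if l == r:
--                 lost.remove(l)
--                 reserve.remove(r)
--
--     a = len(lost)
--     for l in lost:
--         for r in reserve:
--             if l - 1 == r:
--                 reserve.remove(r)
--                 a -= 1
--             elif l + 1 == r:
--                 reserve.remove(r)
--                 a -= 1
--
--     answer = n - a
--     return answer
-- ===== SOURCE B (Python) =====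
-- def solution(n, lost, reserve):
--     # Two staged two-pointer merges over the sorted lists: one merge cancels
--     # students who have their own spare, a second single sweep walks both
--     # remainders in parallel matching each student to a neighbouring spare.
--     # Return value only: unlike A, this does not mutate lost/reserve.
--     ls = sorted(lost)
--     rs = sorted(reserve)
--     L, R = [], []
--     i = j = 0
--     while i < len(ls) and j < len(rs):
--         if ls[i] == rs[j]:
--             i += 1
--             j += 1
--         elif ls[i] < rs[j]:
--             L.append(ls[i])
--             i += 1
--         else:
--             R.append(rs[j])
--             j += 1
--     L.extend(ls[i:])
--     R.extend(rs[j:])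
--     failed = 0
--     i = j = 0
--     while i < len(L):
--         if j < len(R) and R[j] < L[i] - 1:
--             j += 1
--         elif j < len(R) and R[j] <= L[i] + 1:
--             i += 1
--             j += 1
--         else:
--             failed += 1
--             i += 1
--     return n - failed
-- ===== Notes on version B (the rewrite author's own statement) =====
-- stated objective: faster
-- what changed: Replaces A's nested snapshot scans with list.remove by two staged two-pointer merges over the sorted lists: one merge cancels equal ids, then a single parallel sweep of both remainders matches each student to a neighbouring spare, with no per-student rescans or removals.
-- outside the precondition, e.g. on solution(5, [2], [1, 1, 1]): A returns 6, B returns 5; on solution(2, [1], [1, 1]): A raises ValueError, B returns 2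
import Mathlib
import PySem

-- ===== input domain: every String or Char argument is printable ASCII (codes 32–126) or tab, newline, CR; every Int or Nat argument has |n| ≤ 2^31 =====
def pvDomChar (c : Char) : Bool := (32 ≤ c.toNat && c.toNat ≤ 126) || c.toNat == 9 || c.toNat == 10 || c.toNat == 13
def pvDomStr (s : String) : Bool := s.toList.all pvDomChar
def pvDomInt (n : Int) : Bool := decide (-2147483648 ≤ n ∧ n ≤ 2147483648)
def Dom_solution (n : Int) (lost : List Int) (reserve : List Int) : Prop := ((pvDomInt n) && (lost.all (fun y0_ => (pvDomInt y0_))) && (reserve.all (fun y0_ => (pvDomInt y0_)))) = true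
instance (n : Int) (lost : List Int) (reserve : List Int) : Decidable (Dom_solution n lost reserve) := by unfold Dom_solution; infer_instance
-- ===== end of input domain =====

-- B replaces A's quadratic scan/remove greedy by two staged two-pointer merges over the
-- sorted lists (cancel own spares, then one parallel sweep matching neighbour spares);
-- equivalence is about the return value only (A sorts its list arguments in place, B does not).


-- ===== PORT A =====
-- xs.remove(v): Python raises ValueError when v ∉ xs; Pre_ keeps every admitted run away
-- from that case, so the total form keeps the list unchanged there.
def pyRemoveD (xs : List Int) (v : Int) : List Int := (PySem.List.remove? xs v).getD xs

-- phase 1 inner loop: 'for r in reserve[:]: if l == r: lost.remove(l); reserve.remove(r)'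
-- (iterates the snapshot st.2 taken at entry while the state is updated)
def p1Inner (l : Int) (st : List Int × List Int) : List Int × List Int :=
  st.2.foldl (fun s r => if l = r then (pyRemoveD s.1 l, pyRemoveD s.2 r) else s) st

-- phase 2 inner loop: Python's 'for r in reserve: … reserve.remove(r)' iterates by index
-- over the list being mutated; fuel = the list length at entry bounds the index steps.
def p2Scan (l : Int) : Nat → Nat → List Int → Int → List Int × Int
  | 0, _, reserve, a => (reserve, a)
  | fuel + 1, i, reserve, a =>
    match reserve[i]? with
    | none => (reserve, a)
    | some r =>
      if l - 1 = r then p2Scan l fuel (i + 1) (pyRemoveD reserve r) (a - 1)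
      else if l + 1 = r then p2Scan l fuel (i + 1) (pyRemoveD reserve r) (a - 1)
      else p2Scan l fuel (i + 1) reserve a

def solution (n : Int) (lost : List Int) (reserve : List Int) : Int :=
  let lostS := PySem.List.sorted lost (fun x => x) false
  let reserveS := PySem.List.sorted reserve (fun x => x) false
  let st := lostS.foldl (fun st l => p1Inner l st) (lostS, reserveS)
  let a0 : Int := st.1.length
  let fin := st.1.foldl (fun (p : List Int × Int) l => p2Scan l p.1.length 0 p.1 p.2) (st.2, a0)
  n - fin.2

-- ===== PORT B =====
-- stage 1: the first while loop — two pointers over the sorted lists, cancelling equal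
-- ids and accumulating the unmatched remainders (the advancing indices become suffixes)
def bStage1 (ls rs accL accR : List Int) : List Int × List Int :=
  match ls, rs with
  | l :: ls', r :: rs' =>
      if l = r then bStage1 ls' rs' accL accR
      else if l < r then bStage1 ls' (r :: rs') (accL ++ [l]) accR
      else bStage1 (l :: ls') rs' accL (accR ++ [r])
  | ls, rs => (accL ++ ls, accR ++ rs)
termination_by ls.length + rs.length
decreasing_by all_goals (simp only [List.length_cons]; omega)

-- stage 2: the second while loop — one parallel sweep, skipping too-small spares,
-- matching a spare within distance 1, else counting the student as suit-less
def bStage2 (L R : List Int) (failed : Int) : Int :=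
  match L, R with
  | l :: L', r :: R' =>
      if r < l - 1 then bStage2 (l :: L') R' failed
      else if r ≤ l + 1 then bStage2 L' R' failed
      else bStage2 L' (r :: R') (failed + 1)
  | _ :: L', [] => bStage2 L' [] (failed + 1)
  | [], _ => failed
termination_by L.length + R.length
decreasing_by all_goals (simp only [List.length_cons]; omega)

def solution_alt (n : Int) (lost : List Int) (reserve : List Int) : Int :=
  let p := bStage1 (PySem.List.sorted lost (fun x => x) false)
                   (PySem.List.sorted reserve (fun x => x) false) [] []
  n - bStage2 p.1 p.2 0

-- ===== PRECONDITION & SPEC =====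
-- Pre_ excludes inputs where some suit number occurs twice in reserve AND it or a neighbour
-- occurs in lost: there A's list.remove can raise ValueError, and its remove-while-iterating
-- scan can hand several duplicate spares to one student (an artefact of the mutated
-- iteration; on part of this excluded class A happens to agree with B anyway).
def Pre_solution (n : Int) (lost : List Int) (reserve : List Int) : Prop :=
  ∀ v ∈ reserve, 2 ≤ reserve.count v →
    (v - 1) ∉ lost ∧ v ∉ lost ∧ (v + 1) ∉ lost
instance (n : Int) (lost : List Int) (reserve : List Int) : Decidable (Pre_solution n lost reserve) := by unfold Pre_solution; infer_instance

def pvWitness_solution : Int × List Int × List Int := (5, [2, 4, 4], [1, 3, 5])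

def Spec_solution (n : Int) (lost : List Int) (reserve : List Int) (out : Int) : Prop := out = solution_alt n lost reserve
instance (n : Int) (lost : List Int) (reserve : List Int) (out : Int) : Decidable (Spec_solution n lost reserve out) := by unfold Spec_solution; infer_instance

-- ===== CLAIM (what is proved, stated in full; the proofs are below) =====
def Claim_equal_solution : Prop := ∀ (n : Int) (lost : List Int) (reserve : List Int), Dom_solution n lost reserve → Pre_solution n lost reserve → Spec_solution n lost reserve (solution n lost reserve)

-- ===== LEMMAS AND PROOFS =====

-- reference process both sides are reduced to: each student takes spare l-1 if available,
-- else l+1, else goes without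
def seqFail : List Int → List Int → Int
  | [], _ => 0
  | l :: M, R =>
      if (l - 1) ∈ R then seqFail M (R.erase (l - 1))
      else if (l + 1) ∈ R then seqFail M (R.erase (l + 1))
      else seqFail M R + 1

lemma erase_cons_ne (b a : Int) (l : List Int) (h : b ≠ a) :
    (b :: l).erase a = b :: l.erase a :=
  List.erase_cons_tail (by simpa using h)

lemma pyRemoveD_eq_erase (xs : List Int) (v : Int) : pyRemoveD xs v = xs.erase v := by
  by_cases h : v ∈ xs
  · simp [pyRemoveD, PySem.List.remove?_eq_some_erase _ _ h]
  · simp [pyRemoveD, (PySem.List.remove?_eq_none_iff xs v).mpr h, List.erase_of_not_mem h]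

-- phase 1 inner fold over a snapshot not containing l does nothing
lemma p1Inner_fold_id (l : Int) (t : List Int) (st : List Int × List Int)
    (h : ∀ r ∈ t, l ≠ r) :
    t.foldl (fun s r => if l = r then (pyRemoveD s.1 l, pyRemoveD s.2 r) else s) st = st := by
  induction t generalizing st with
  | nil => rfl
  | cons r t ih =>
    have hr : l ≠ r := h r (by simp)
    simp only [List.foldl_cons, if_neg hr]
    exact ih st (fun r hr => h r (by simp [hr]))

-- phase 1 inner loop, for an id with at most one spare copy: remove the pair, if any
lemma p1Inner_eq (l : Int) (s1 s2 : List Int) (h2 : s2.count l ≤ 1) :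
    p1Inner l (s1, s2) =
      if l ∈ s2 then (s1.erase l, s2.erase l) else (s1, s2) := by
  by_cases hm : l ∈ s2
  · obtain ⟨u, v, rfl⟩ := List.append_of_mem hm
    have hcnt : u.count l + (v.count l + 1) ≤ 1 := by
      simpa [List.count_append, List.count_cons] using h2
    have hlu : l ∉ u := by
      rw [← List.count_eq_zero]; omega
    have hlv : l ∉ v := by
      rw [← List.count_eq_zero]; omega
    simp only [p1Inner, if_pos hm, List.foldl_append]
    rw [p1Inner_fold_id l u _ (fun r hr h => hlu (h ▸ hr))]
    simp only [List.foldl_cons, if_pos rfl]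
    rw [p1Inner_fold_id l v _ (fun r hr h => hlv (h ▸ hr))]
    simp [pyRemoveD_eq_erase, List.erase_append_right _ hlu]
  · simp only [p1Inner, if_neg hm]
    exact p1Inner_fold_id l s2 (s1, s2) (fun r hr h => hm (h ▸ hr))

-- A's phase-1 fold computes the two multiset differences (count form), shrinking both pools
lemma pass1 (T : List Int) :
    ∀ (s1 s2 : List Int),
    (∀ l ∈ T, s2.count l ≤ 1) → (∀ v, T.count v ≤ s1.count v) →
    let F := T.foldl (fun st l => p1Inner l st) (s1, s2)
    (∀ v, F.1.count v = s1.count v - min (T.count v) (s2.count v)) ∧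
    (∀ v, F.2.count v = s2.count v - min (T.count v) (s2.count v)) ∧
    F.1.Sublist s1 ∧ F.2.Sublist s2 := by
  induction T with
  | nil =>
    intro s1 s2 _ _
    exact ⟨fun v => by simp, fun v => by simp, List.Sublist.refl _, List.Sublist.refl _⟩
  | cons l T ih =>
    intro s1 s2 hc hle
    simp only [List.foldl_cons]
    rw [p1Inner_eq l s1 s2 (hc l (by simp))]
    by_cases hm : l ∈ s2
    · rw [if_pos hm]
      have hls2 : s2.count l = 1 :=
        le_antisymm (hc l (by simp)) (List.count_pos_iff.mpr hm)
      have hls1 : l ∈ s1 := by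
        rw [← List.count_pos_iff]
        have := hle l
        simp [List.count_cons_self] at this
        omega
      have hc' : ∀ l' ∈ T, (s2.erase l).count l' ≤ 1 :=
        fun l' hl' => le_trans (List.Sublist.count_le l' (List.erase_sublist))
          (hc l' (by simp [hl']))
      have hle' : ∀ v, T.count v ≤ (s1.erase l).count v := by
        intro v
        by_cases hv : v = l
        · subst hv
          rw [List.count_erase_self]
          have := hle v
          simp [List.count_cons_self] at this
          omega
        · rw [List.count_erase_of_ne hv]
          have := hle v
          rw [List.count_cons_of_ne (Ne.symm hv)] at this
          exact this
      obtain ⟨g1, g2, g3, g4⟩ := ih (s1.erase l) (s2.erase l) hc' hle'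
      refine ⟨?_, ?_, g3.trans (List.erase_sublist), g4.trans (List.erase_sublist)⟩
      · intro v
        rw [g1 v]
        by_cases hv : v = l
        · subst hv
          rw [List.count_erase_self, List.count_erase_self, List.count_cons_self, hls2]
          have h1 : 1 ≤ s1.count v := List.count_pos_iff.mpr hls1
          omega
        · rw [List.count_erase_of_ne hv, List.count_erase_of_ne hv, List.count_cons_of_ne (Ne.symm hv)]
      · intro v
        rw [g2 v]
        by_cases hv : v = l
        · subst hv
          rw [List.count_erase_self, List.count_cons_self, hls2]
          omega
        · rw [List.count_erase_of_ne hv, List.count_cons_of_ne (Ne.symm hv)]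
    · rw [if_neg hm]
      have hls2 : s2.count l = 0 := List.count_eq_zero.mpr hm
      obtain ⟨g1, g2, g3, g4⟩ := ih s1 s2 (fun l' hl' => hc l' (by simp [hl']))
        (fun v => le_trans (List.Sublist.count_le v (List.sublist_cons_self l T)) (hle v))
      refine ⟨?_, ?_, g3, g4⟩
      · intro v
        rw [g1 v]
        by_cases hv : v = l
        · subst hv; rw [List.count_cons_self, hls2]; omega
        · rw [List.count_cons_of_ne (Ne.symm hv)]
      · intro v
        rw [g2 v]
        by_cases hv : v = l
        · subst hv; rw [List.count_cons_self, hls2]; omega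
        · rw [List.count_cons_of_ne (Ne.symm hv)]

-- prepending an element absent from the subtrahend commutes with List.diff
lemma cons_diff_notMem (a : Int) : ∀ (l₂ l₁ : List Int), a ∉ l₂ →
    (a :: l₁).diff l₂ = a :: l₁.diff l₂ := by
  intro l₂
  induction l₂ with
  | nil => intro l₁ _; simp
  | cons b l₂ ih =>
    intro l₁ h
    have hab : a ≠ b := fun hh => h (by simp [hh])
    rw [List.diff_cons, List.diff_cons, erase_cons_ne a b l₁ hab,
      ih (l₁.erase b) (fun hh => h (by simp [hh]))]

-- B's stage-1 merge computes List.diff both ways, for sorted inputs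
lemma bStage1_spec (N : Nat) : ∀ (ls rs accL accR : List Int), ls.length + rs.length ≤ N →
    ls.Pairwise (· ≤ ·) → rs.Pairwise (· ≤ ·) →
    bStage1 ls rs accL accR = (accL ++ ls.diff rs, accR ++ rs.diff ls) := by
  induction N with
  | zero =>
    intro ls rs accL accR hN _ _
    have hls : ls = [] := by
      cases ls with
      | nil => rfl
      | cons a l => simp [List.length_cons] at hN
    have hrs : rs = [] := by
      cases rs with
      | nil => rfl
      | cons a l => simp [List.length_cons] at hN
    subst hls; subst hrs
    simp [bStage1]
  | succ N ih =>
    intro ls rs accL accR hN hls hrs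
    cases ls with
    | nil => simp [bStage1]
    | cons l ls' =>
      cases rs with
      | nil => simp [bStage1]
      | cons r rs' =>
        have hls'ge : ∀ x ∈ ls', l ≤ x := (List.pairwise_cons.mp hls).1
        have hrs'ge : ∀ x ∈ rs', r ≤ x := (List.pairwise_cons.mp hrs).1
        have hls'pw : ls'.Pairwise (· ≤ ·) := (List.pairwise_cons.mp hls).2
        have hrs'pw : rs'.Pairwise (· ≤ ·) := (List.pairwise_cons.mp hrs).2
        by_cases heq : l = r
        · have e1 : bStage1 (l :: ls') (r :: rs') accL accR = bStage1 ls' rs' accL accR := by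
            rw [bStage1]; simp [heq]
          rw [e1, ih ls' rs' accL accR (by simp at hN ⊢; omega) hls'pw hrs'pw]
          subst heq
          rw [List.diff_cons, List.erase_cons_head, List.diff_cons, List.erase_cons_head]
        · by_cases hlt : l < r
          · have e1 : bStage1 (l :: ls') (r :: rs') accL accR
                = bStage1 ls' (r :: rs') (accL ++ [l]) accR := by
              rw [bStage1]; simp [heq, hlt]
            have hlnot : l ∉ r :: rs' := by
              intro hh
              rcases List.mem_cons.mp hh with hh | hh
              · omega
              · have := hrs'ge _ hh; omega
            rw [e1, ih ls' (r :: rs') (accL ++ [l]) accR (by simp at hN ⊢; omega) hls'pw hrs]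
            rw [cons_diff_notMem l (r :: rs') ls' hlnot]
            rw [show (r :: rs').diff (l :: ls') = (r :: rs').diff ls' from by
              rw [List.diff_cons, List.erase_of_not_mem hlnot]]
            simp
          · have hgt : r < l := by omega
            have e1 : bStage1 (l :: ls') (r :: rs') accL accR
                = bStage1 (l :: ls') rs' accL (accR ++ [r]) := by
              rw [bStage1]; simp [heq, hlt]
            have hrnot : r ∉ l :: ls' := by
              intro hh
              rcases List.mem_cons.mp hh with hh | hh
              · omega
              · have := hls'ge _ hh; omega
            rw [e1, ih (l :: ls') rs' accL (accR ++ [r]) (by simp at hN ⊢; omega) hls hrs'pw]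
            rw [cons_diff_notMem r (l :: ls') rs' hrnot]
            rw [show (l :: ls').diff (r :: rs') = (l :: ls').diff rs' from by
              rw [List.diff_cons, List.erase_of_not_mem hrnot]]
            simp

-- skipping a spare no student can use leaves the reference process unchanged
lemma seqFail_skip (M : List Int) :
    ∀ (r : Int) (R : List Int), (∀ l ∈ M, l - 1 ≠ r ∧ l + 1 ≠ r) →
    seqFail M (r :: R) = seqFail M R := by
  induction M with
  | nil => intro r R _; rfl
  | cons l M ih =>
    intro r R h
    have h1 : l - 1 ≠ r := (h l (by simp)).1
    have h2 : l + 1 ≠ r := (h l (by simp)).2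
    have e1 : (r :: R).erase (l - 1) = r :: R.erase (l - 1) :=
      erase_cons_ne r (l - 1) R (fun hh => h1 hh.symm)
    have e2 : (r :: R).erase (l + 1) = r :: R.erase (l + 1) :=
      erase_cons_ne r (l + 1) R (fun hh => h2 hh.symm)
    simp only [seqFail, List.mem_cons, e1, e2]
    have hm1 : (l - 1 = r ∨ l - 1 ∈ R) ↔ l - 1 ∈ R := by
      constructor
      · rintro (hh | hh)
        · exact absurd hh h1
        · exact hh
      · exact Or.inr
    have hm2 : (l + 1 = r ∨ l + 1 ∈ R) ↔ l + 1 ∈ R := by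
      constructor
      · rintro (hh | hh)
        · exact absurd hh h2
        · exact hh
      · exact Or.inr
    by_cases hb1 : l - 1 ∈ R
    · rw [if_pos (hm1.mpr hb1), if_pos hb1]
      exact ih r (R.erase (l - 1)) (fun l' hl' => h l' (by simp [hl']))
    · rw [if_neg (fun hh => hb1 (hm1.mp hh)), if_neg hb1]
      by_cases hb2 : l + 1 ∈ R
      · rw [if_pos (hm2.mpr hb2), if_pos hb2]
        exact ih r (R.erase (l + 1)) (fun l' hl' => h l' (by simp [hl']))
      · rw [if_neg (fun hh => hb2 (hm2.mp hh)), if_neg hb2]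
        rw [ih r R (fun l' hl' => h l' (by simp [hl']))]

-- B's stage-2 sweep equals the reference process on sorted disjoint remainders
lemma bStage2_eq (N : Nat) : ∀ (M R : List Int) (f : Int), M.length + R.length ≤ N →
    M.Pairwise (· ≤ ·) → R.Pairwise (· ≤ ·) →
    (∀ l ∈ M, l ∉ R ∧ R.count (l - 1) ≤ 1 ∧ R.count (l + 1) ≤ 1) →
    bStage2 M R f = f + seqFail M R := by
  induction N with
  | zero =>
    intro M R f hN _ _ _
    have hM : M = [] := by
      cases M with
      | nil => rfl
      | cons a M => simp [List.length_cons] at hN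
    subst hM
    simp [bStage2, seqFail]
  | succ N ih =>
    intro M R f hN hMpw hRpw hcond
    cases M with
    | nil => simp [bStage2, seqFail]
    | cons l M' =>
      cases R with
      | nil =>
        have e1 : bStage2 (l :: M') [] f = bStage2 M' [] (f + 1) := by
          rw [bStage2]
        rw [e1, ih M' [] (f + 1) (by simp at hN ⊢; omega)
          (List.Pairwise.sublist (List.sublist_cons_self l M') hMpw) (by simp)
          (fun l' hl' => hcond l' (by simp [hl']))]
        simp [seqFail]
        ring
      | cons r R' =>
        have hlR := hcond l (by simp)
        have hM'ge : ∀ x ∈ M', l ≤ x := (List.pairwise_cons.mp hMpw).1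
        have hR'ge : ∀ x ∈ R', r ≤ x := (List.pairwise_cons.mp hRpw).1
        have hM'pw : M'.Pairwise (· ≤ ·) := (List.pairwise_cons.mp hMpw).2
        have hR'pw : R'.Pairwise (· ≤ ·) := (List.pairwise_cons.mp hRpw).2
        have hcondR' : ∀ l' ∈ l :: M',
            l' ∉ R' ∧ R'.count (l' - 1) ≤ 1 ∧ R'.count (l' + 1) ≤ 1 := by
          intro l' hl'
          obtain ⟨a1, a2, a3⟩ := hcond l' hl'
          exact ⟨fun hh => a1 (by simp [hh]),
            le_trans (List.Sublist.count_le _ (List.sublist_cons_self r R')) a2,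
            le_trans (List.Sublist.count_le _ (List.sublist_cons_self r R')) a3⟩
        by_cases hlt : r < l - 1
        · have e1 : bStage2 (l :: M') (r :: R') f = bStage2 (l :: M') R' f := by
            rw [bStage2]; simp [hlt]
          have hskip : seqFail (l :: M') (r :: R') = seqFail (l :: M') R' := by
            apply seqFail_skip
            intro l' hl'
            have : l ≤ l' := by
              rcases List.mem_cons.mp hl' with hh | hh
              · omega
              · exact hM'ge l' hh
            constructor <;> omega
          rw [e1, hskip]
          exact ih (l :: M') R' f (by simp at hN ⊢; omega) hMpw hR'pw hcondR'
        · by_cases hle2 : r ≤ l + 1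
          · have hrl : r ≠ l := fun hh => hlR.1 (by simp [hh])
            have e1 : bStage2 (l :: M') (r :: R') f = bStage2 M' R' f := by
              rw [bStage2]; simp [hlt, hle2]
            have hcond' : ∀ l' ∈ M',
                l' ∉ R' ∧ R'.count (l' - 1) ≤ 1 ∧ R'.count (l' + 1) ≤ 1 :=
              fun l' hl' => hcondR' l' (by simp [hl'])
            rcases (by omega : r = l - 1 ∨ r = l + 1) with hr | hr
            · have hs : seqFail (l :: M') (r :: R') = seqFail M' R' := by
                simp only [seqFail]
                rw [if_pos (by simp [hr]), hr, List.erase_cons_head]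
              rw [e1, hs]
              exact ih M' R' f (by simp at hN ⊢; omega) hM'pw hR'pw hcond'
            · have hno1 : l - 1 ∉ r :: R' := by
                intro hh
                rcases List.mem_cons.mp hh with hh | hh
                · omega
                · have := hR'ge _ hh; omega
              have hs : seqFail (l :: M') (r :: R') = seqFail M' R' := by
                simp only [seqFail]
                rw [if_neg hno1, if_pos (by simp [hr]), hr, List.erase_cons_head]
              rw [e1, hs]
              exact ih M' R' f (by simp at hN ⊢; omega) hM'pw hR'pw hcond'
          · have e1 : bStage2 (l :: M') (r :: R') f = bStage2 M' (r :: R') (f + 1) := by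
              rw [bStage2]; simp [hlt, hle2]
            have hno1 : l - 1 ∉ r :: R' := by
              intro hh
              rcases List.mem_cons.mp hh with hh | hh
              · omega
              · have := hR'ge _ hh; omega
            have hno2 : l + 1 ∉ r :: R' := by
              intro hh
              rcases List.mem_cons.mp hh with hh | hh
              · omega
              · have := hR'ge _ hh; omega
            have hs : seqFail (l :: M') (r :: R') = seqFail M' (r :: R') + 1 := by
              simp only [seqFail]
              rw [if_neg hno1, if_neg hno2]
            rw [e1, hs, ih M' (r :: R') (f + 1) (by simp at hN ⊢; omega) hM'pw hRpw
              (fun l' hl' => hcond l' (by simp [hl']))]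
            ring

-- the phase-2 scan does nothing once no remaining position can match
lemma p2Scan_noMatch (l : Int) (fuel : Nat) :
    ∀ (i : Nat) (reserve : List Int) (a : Int),
    (∀ j, i ≤ j → ∀ r, reserve[j]? = some r → l - 1 ≠ r ∧ l + 1 ≠ r) →
    p2Scan l fuel i reserve a = (reserve, a) := by
  induction fuel with
  | zero => intro i reserve a _; rfl
  | succ fuel ih =>
    intro i reserve a h
    simp only [p2Scan]
    cases hg : reserve[i]? with
    | none => rfl
    | some r =>
      have hne := h i le_rfl r hg
      simp only [if_neg hne.1, if_neg hne.2]
      exact ih (i + 1) reserve a (fun j hj => h j (by omega))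

-- the phase-2 scan on a sorted reserve holding at most one spare of each neighbour id and
-- no spare of l itself removes l-1 if present, else l+1 if present, else nothing
lemma p2Scan_eq (l : Int) :
    ∀ (rest pre : List Int) (a : Int) (fuel : Nat), rest.length ≤ fuel →
    (pre ++ rest).Pairwise (· ≤ ·) → l ∉ pre ++ rest →
    (pre ++ rest).count (l - 1) ≤ 1 → (pre ++ rest).count (l + 1) ≤ 1 →
    (∀ x ∈ pre, l - 1 ≠ x ∧ l + 1 ≠ x) →
    p2Scan l fuel pre.length (pre ++ rest) a =
      if l - 1 ∈ rest then ((pre ++ rest).erase (l - 1), a - 1)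
      else if l + 1 ∈ rest then ((pre ++ rest).erase (l + 1), a - 1)
      else (pre ++ rest, a) := by
  intro rest
  induction rest with
  | nil =>
    intro pre a fuel _ _ _ _ _ _
    simp only [List.not_mem_nil, if_neg, List.append_nil]
    cases fuel with
    | zero => rfl
    | succ fuel => simp [p2Scan]
  | cons r rest ih =>
    intro pre a fuel hfuel hsort hl hc1 hc2 hpre
    cases fuel with
    | zero => simp at hfuel
    | succ fuel =>
    have hget : (pre ++ r :: rest)[pre.length]? = some r := by
      rw [List.getElem?_append_right le_rfl]
      simp
    have hrrest : ∀ x ∈ rest, r ≤ x := by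
      intro x hx
      have := (List.pairwise_append.mp hsort).2.1
      exact (List.pairwise_cons.mp this).1 x hx
    have hlr : l ≠ r := fun h => hl (by simp [h])
    simp only [p2Scan, hget]
    by_cases h1 : l - 1 = r
    · subst h1
      rw [if_pos rfl]
      have hnotpre : l - 1 ∉ pre := fun h => (hpre _ h).1 rfl
      have herase : (pre ++ (l - 1) :: rest).erase (l - 1) = pre ++ rest := by
        rw [List.erase_append_right _ hnotpre]
        simp
      have hrest1 : l - 1 ∉ rest := by
        intro h
        have : 2 ≤ (pre ++ (l - 1) :: rest).count (l - 1) := by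
          have := List.count_pos_iff.mpr h
          simp only [List.count_append, List.count_cons_self]
          omega
        omega
      rw [pyRemoveD_eq_erase, herase]
      rw [p2Scan_noMatch l fuel (pre.length + 1) (pre ++ rest) (a - 1) ?_]
      · rw [if_pos (by simp)]
      · intro j hj x hg
        have hjlen : j < pre.length + rest.length := by
          have := List.getElem?_eq_some_iff.mp hg
          simpa using this.1
        have hx : x = rest[j - pre.length]'(by omega) := by
          rw [List.getElem?_append_right (by omega)] at hg
          rw [List.getElem?_eq_some_iff] at hg
          obtain ⟨h, hh⟩ := hg
          exact hh.symm
        have hxmem : x ∈ rest := hx ▸ List.getElem_mem _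
        have hxne1 : x ≠ l - 1 := fun h => hrest1 (h ▸ hxmem)
        have hk : 1 ≤ j - pre.length := by omega
        obtain ⟨r2, rest', rfl⟩ := List.exists_cons_of_ne_nil
          (by intro h; subst h; simp at hjlen; omega : rest ≠ [])
        have hr2 : l - 1 ≤ r2 := hrrest r2 (by simp)
        have hr2l : r2 ≠ l := fun h => hl (by simp [h])
        have hr2ne1 : r2 ≠ l - 1 := fun h => hrest1 (by simp [h])
        obtain ⟨k, hk'⟩ : ∃ k, j - pre.length = k + 1 := ⟨j - pre.length - 1, by omega⟩
        have hxmem' : x ∈ rest' := by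
          have hg2 := hg
          rw [List.getElem?_append_right (by omega : pre.length ≤ j), hk'] at hg2
          simp only [List.getElem?_cons_succ] at hg2
          exact List.mem_of_getElem? hg2
        have hxne2 : x ≠ l + 1 := by
          intro hxl
          have hr2x : r2 ≤ x := (List.pairwise_cons.mp
            ((List.pairwise_append.mp hsort).2.1 |> List.pairwise_cons.mp |>.2)).1 x hxmem'
          have hr2eq : r2 = l + 1 := by omega
          have h2' : 2 ≤ (r2 :: rest').count (l + 1) := by
            rw [hr2eq, List.count_cons_self]
            have := List.count_pos_iff.mpr (hxl ▸ hxmem')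
            omega
          have hsub : (r2 :: rest').Sublist (pre ++ (l - 1) :: r2 :: rest') :=
            List.Sublist.trans (List.sublist_cons_self _ _) (List.sublist_append_right _ _)
          have := List.Sublist.count_le (l + 1) hsub
          omega
        exact ⟨fun h => hxne1 h.symm, fun h => hxne2 h.symm⟩
    · rw [if_neg h1]
      by_cases h2 : l + 1 = r
      · subst h2
        rw [if_pos rfl]
        have hno1 : l - 1 ∉ (l + 1) :: rest := by
          simp only [List.mem_cons]
          rintro (h | h)
          · omega
          · have := hrrest _ h; omega
        have hnotpre : l + 1 ∉ pre := fun h => (hpre _ h).2 rfl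
        have herase : (pre ++ (l + 1) :: rest).erase (l + 1) = pre ++ rest := by
          rw [List.erase_append_right _ hnotpre]
          simp
        have hrest2 : l + 1 ∉ rest := by
          intro h
          have : 2 ≤ (pre ++ (l + 1) :: rest).count (l + 1) := by
            have := List.count_pos_iff.mpr h
            simp only [List.count_append, List.count_cons_self]
            omega
          omega
        rw [pyRemoveD_eq_erase, herase]
        rw [p2Scan_noMatch l fuel (pre.length + 1) (pre ++ rest) (a - 1) ?_]
        · rw [if_neg (by simpa using hno1), if_pos (by simp)]
        · intro j hj x hg
          have hjlen : j < pre.length + rest.length := by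
            have := List.getElem?_eq_some_iff.mp hg
            simpa using this.1
          have hx : x = rest[j - pre.length]'(by omega) := by
            rw [List.getElem?_append_right (by omega)] at hg
            rw [List.getElem?_eq_some_iff] at hg
            obtain ⟨h, hh⟩ := hg
            exact hh.symm
          have hxmem : x ∈ rest := hx ▸ List.getElem_mem _
          have hge : l + 1 ≤ x := hrrest x hxmem
          exact ⟨by omega, fun h => hrest2 (h ▸ hxmem)⟩
      · rw [if_neg h2]
        have := ih (pre ++ [r]) a fuel (by simpa using hfuel)
          (by simpa using hsort) (by simpa using hl)
          (by simpa using hc1) (by simpa using hc2)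
          (by intro x hx
              rcases List.mem_append.mp hx with h | h
              · exact hpre x h
              · simp at h; subst h; exact ⟨h1, h2⟩)
        simp only [List.length_append, List.length_cons, List.length_nil, Nat.zero_add,
          List.append_assoc, List.cons_append, List.nil_append] at this
        rw [this]
        by_cases hc1' : l - 1 ∈ rest
        · simp [hc1']
        · by_cases hc2' : l + 1 ∈ rest
          · simp [hc1', hc2', fun h => h1 h]
          · simp [hc1', hc2', fun h => h1 h, fun h => h2 h]

-- A's phase-2 fold equals the reference process
lemma phase2_eq (M : List Int) :
    ∀ (rA : List Int) (a : Int),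
    rA.Pairwise (· ≤ ·) →
    (∀ l ∈ M, l ∉ rA ∧ rA.count (l - 1) ≤ 1 ∧ rA.count (l + 1) ≤ 1) →
    (M.foldl (fun (p : List Int × Int) l => p2Scan l p.1.length 0 p.1 p.2) (rA, a)).2
      = a - M.length + seqFail M rA := by
  induction M with
  | nil => intro rA a _ _; simp [seqFail]
  | cons l M ih =>
    intro rA a hA hcond
    obtain ⟨hlA, hcl1, hcl2⟩ := hcond l (by simp)
    have step := p2Scan_eq l rA [] a rA.length le_rfl (by simpa using hA) (by simpa using hlA)
      (by simpa using hcl1) (by simpa using hcl2) (by simp)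
    simp only [List.nil_append, List.length_nil] at step
    have hcond' : ∀ (v : Int), ∀ l' ∈ M, l' ∉ rA.erase v ∧ (rA.erase v).count (l' - 1) ≤ 1 ∧
        (rA.erase v).count (l' + 1) ≤ 1 := by
      intro v l' hl'
      obtain ⟨h1, h2, h3⟩ := hcond l' (by simp [hl'])
      exact ⟨fun h => h1 (List.mem_of_mem_erase h),
        le_trans (List.Sublist.count_le _ (List.erase_sublist)) h2,
        le_trans (List.Sublist.count_le _ (List.erase_sublist)) h3⟩
    simp only [List.foldl_cons, step, seqFail]
    by_cases h1 : l - 1 ∈ rA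
    · rw [if_pos h1, if_pos h1]
      rw [ih (rA.erase (l - 1)) (a - 1) (List.Pairwise.sublist (List.erase_sublist) hA)
        (hcond' (l - 1))]
      simp only [List.length_cons]
      push_cast
      ring
    · rw [if_neg h1, if_neg h1]
      by_cases h2 : l + 1 ∈ rA
      · rw [if_pos h2, if_pos h2]
        rw [ih (rA.erase (l + 1)) (a - 1) (List.Pairwise.sublist (List.erase_sublist) hA)
          (hcond' (l + 1))]
        simp only [List.length_cons]
        push_cast
        ring
      · rw [if_neg h2, if_neg h2]
        rw [ih rA a hA (fun l' hl' => hcond l' (by simp [hl']))]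
        simp only [List.length_cons]
        push_cast
        ring

-- ===== VERDICT (by name: the statement is the Claim_ definition above) =====
theorem solution_spec : Claim_equal_solution := by
  intro n lost reserve _ hpre
  unfold Spec_solution solution solution_alt
  dsimp only
  set sL := PySem.List.sorted lost (fun x => x) false with hsL
  set sR := PySem.List.sorted reserve (fun x => x) false with hsR
  have hsLperm : sL.Perm lost := PySem.List.sorted_perm lost (fun x => x) false
  have hsRperm : sR.Perm reserve := PySem.List.sorted_perm reserve (fun x => x) false
  have hsLpw : sL.Pairwise (· ≤ ·) := PySem.List.sorted_pairwise lost (fun x => x)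
  have hsRpw : sR.Pairwise (· ≤ ·) := PySem.List.sorted_pairwise reserve (fun x => x)
  -- the precondition, transported to the sorted lists
  have hP : ∀ v : Int, 2 ≤ sR.count v → (v - 1) ∉ sL ∧ v ∉ sL ∧ (v + 1) ∉ sL := by
    intro v hv
    rw [hsRperm.count_eq] at hv
    have hvr : v ∈ reserve := by
      rw [← List.count_pos_iff]; omega
    obtain ⟨a1, a2, a3⟩ := hpre v hvr hv
    exact ⟨fun h => a1 (hsLperm.mem_iff.mp h), fun h => a2 (hsLperm.mem_iff.mp h),
      fun h => a3 (hsLperm.mem_iff.mp h)⟩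
  have h5 : ∀ l ∈ sL, sR.count l ≤ 1 := by
    intro l hl
    by_contra h
    exact (hP l (by omega)).2.1 hl
  -- phase 1 computes the two multiset differences
  obtain ⟨g1, g2, g3, g4⟩ := pass1 sL sL sR h5 (fun v => le_refl _)
  set FA := sL.foldl (fun st l => p1Inner l st) (sL, sR) with hFA
  -- which, both sides being sorted, are exactly B's stage-1 lists
  have hpermX : FA.1.Perm (sL.diff sR) := by
    refine List.perm_iff_count.mpr ?_
    intro v
    rw [g1 v, List.count_diff]
    omega
  have hXeq : FA.1 = sL.diff sR :=
    hpermX.eq_of_pairwise (fun a b _ _ h1 h2 => le_antisymm h1 h2)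
      (List.Pairwise.sublist g3 hsLpw) (List.Pairwise.sublist (List.diff_sublist sL sR) hsLpw)
  have hpermY : FA.2.Perm (sR.diff sL) := by
    refine List.perm_iff_count.mpr ?_
    intro v
    rw [g2 v, List.count_diff]
    omega
  have hYeq : FA.2 = sR.diff sL :=
    hpermY.eq_of_pairwise (fun a b _ _ h1 h2 => le_antisymm h1 h2)
      (List.Pairwise.sublist g4 hsRpw) (List.Pairwise.sublist (List.diff_sublist sR sL) hsRpw)
  have hB1 : bStage1 sL sR [] [] = (sL.diff sR, sR.diff sL) := by
    rw [bStage1_spec (sL.length + sR.length) sL sR [] [] le_rfl hsLpw hsRpw]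
    simp
  -- conditions on the remainders
  have hXpw : (sL.diff sR).Pairwise (· ≤ ·) :=
    List.Pairwise.sublist (List.diff_sublist sL sR) hsLpw
  have hYpw : (sR.diff sL).Pairwise (· ≤ ·) :=
    List.Pairwise.sublist (List.diff_sublist sR sL) hsRpw
  have hcond : ∀ l ∈ sL.diff sR,
      l ∉ sR.diff sL ∧ (sR.diff sL).count (l - 1) ≤ 1 ∧ (sR.diff sL).count (l + 1) ≤ 1 := by
    intro l hl
    have hlL : l ∈ sL := (List.diff_sublist sL sR).subset hl
    refine ⟨?_, ?_, ?_⟩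
    · intro hmem
      have hc1 : 1 ≤ (sL.diff sR).count l := List.count_pos_iff.mpr hl
      have hc2 : 1 ≤ (sR.diff sL).count l := List.count_pos_iff.mpr hmem
      rw [List.count_diff] at hc1 hc2
      omega
    · refine le_trans (List.Sublist.count_le _ (List.diff_sublist sR sL)) ?_
      by_contra h
      exact (hP (l - 1) (by omega)).2.2 (by simpa using hlL)
    · refine le_trans (List.Sublist.count_le _ (List.diff_sublist sR sL)) ?_
      by_contra h
      exact (hP (l + 1) (by omega)).1 (by simpa using hlL)
  -- A's phase 2 and B's stage 2 both compute the reference process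
  have hA2 := phase2_eq FA.1 FA.2 (FA.1.length : Int)
    (hYeq ▸ hYpw) (by rw [hXeq, hYeq]; exact hcond)
  have hB2 := bStage2_eq ((sL.diff sR).length + (sR.diff sL).length)
    (sL.diff sR) (sR.diff sL) 0 le_rfl hXpw hYpw hcond
  rw [hB1]
  dsimp only
  rw [hA2, hB2, hXeq, hYeq]
  ring
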